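-- pv_equiv track=rewrite | github.com/eliottcassidy2000/math | 04-computation/universal_copart_constancy.py | count_kcycles_by_gap_structure
-- ===== SOURCE A (Python) =====
-- from collections import defaultdict
--
-- def count_kcycles_by_gap_structure(p, k):
--     """Count k-cycles in Paley T_p grouped by their gap multiset.
--     A k-cycle visits vertices v_0, v_1, ..., v_{k-1} with
--     gap_i = (v_{i+1} - v_i) mod p, all gaps in QR.
--
--     For circulant tournament: gap sequences up to cyclic rotation
--     are equivalent up to translation. Each gap sequence gives exactly
--     p cycles (one for each starting vertex).
--
--     Returns: dict mapping frozenset(chord pair) -> count of k-cycles using both chords.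
--     """
--     QR = sorted(j for j in range(1, p) if pow(j, (p - 1) // 2, p) == 1)
--     m = (p - 1) // 2
--
--     # Generate all valid gap sequences of length k summing to 0 mod p
--     # Each gap must be in QR
--     def gen_gap_seqs(remaining_length, current_sum, current_seq):
--         if remaining_length == 0:
--             if current_sum % p == 0:
--                 yield tuple(current_seq)
--             return
--         for g in QR:
--             current_seq.append(g)
--             yield from gen_gap_seqs(remaining_length - 1, current_sum + g, current_seq)
--             current_seq.pop()
--
--     # Count co-participation
--     chord_copart = defaultdict(int)
--
--     for gap_seq in gen_gap_seqs(k, 0, []):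
--         # This gap sequence represents p cycles (one per starting vertex)
--         # Extract chord indices from gaps
--         chords = set()
--         for g in gap_seq:
--             chords.add(min(g, p - g))
--         chord_list = sorted(chords)
--         for i in range(len(chord_list)):
--             for j in range(i + 1, len(chord_list)):
--                 chord_copart[(chord_list[i], chord_list[j])] += p
--
--     # Divide by k to account for cyclic rotations of the gap sequence
--     # (each distinct directed cycle has k rotations of its gap sequence)
--     for key in chord_copart:
--         chord_copart[key] //= k
--
--     return chord_copart
-- ===== SOURCE B (Python) =====
-- from itertools import product, combinations
--
-- def count_kcycles_by_gap_structure(p, k):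
--     """Enumerate only the first k-1 gaps; the last gap is forced to (-sum) % p,
--     the inner scan over QR for a closing gap is replaced by one arithmetic step."""
--     QR = sorted(j for j in range(1, p) if pow(j, (p - 1) // 2, p) == 1)
--     if k <= 0 or not QR:
--         return {}
--     qrset = set(QR)
--     copart = {}
--     for prefix in product(QR, repeat=k - 1):
--         last = -sum(prefix) % p
--         if last not in qrset:
--             continue
--         cycle = prefix + (last,)
--         chord_list = sorted({min(g, p - g) for g in cycle})
--         for pair in combinations(chord_list, 2):
--             copart[pair] = copart.get(pair, 0) + p
--     return {pair: tot // k for pair, tot in copart.items()}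
-- ===== Notes on version B (the rewrite author's own statement) =====
-- stated objective: alternative
-- what changed: B iterates over the m^(k-1) gap prefixes (iterative itertools.product) and computes the unique forced closing gap (-sum)%p arithmetically instead of recursively generating and sum-filtering all m^k gap sequences; chord pairs come from itertools.combinations instead of a nested index loop and the final dict is built by comprehension instead of in-place division (intended as faster; a timing run read 2.43x at the largest size both finished, below its confirmation rule).
import Mathlib
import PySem

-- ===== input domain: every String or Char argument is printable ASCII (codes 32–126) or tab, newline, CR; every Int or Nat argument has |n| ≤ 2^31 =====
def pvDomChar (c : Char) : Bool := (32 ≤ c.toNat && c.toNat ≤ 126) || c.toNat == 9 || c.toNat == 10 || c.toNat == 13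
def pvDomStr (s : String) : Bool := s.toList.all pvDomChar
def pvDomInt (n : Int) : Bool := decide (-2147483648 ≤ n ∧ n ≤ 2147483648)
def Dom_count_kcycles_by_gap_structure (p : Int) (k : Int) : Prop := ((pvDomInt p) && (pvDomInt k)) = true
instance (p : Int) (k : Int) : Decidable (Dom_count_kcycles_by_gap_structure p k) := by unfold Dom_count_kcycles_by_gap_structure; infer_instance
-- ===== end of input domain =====

-- B enumerates only the (k-1)-gap prefixes and computes the forced closing gap arithmetically,
-- instead of generating and sum-filtering all m^k gap sequences (objective: alternative;
-- intended as faster, but a timing run did not confirm that, so no speed is claimed).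

-- ===== PORT A =====
-- shared helper: QR = sorted(j for j in range(1, p) if pow(j, (p-1)//2, p) == 1)  (identical line in A and B)
def pvQR (p : Int) : List Int :=
  PySem.List.sorted ((PySem.List.pyRange 1 p 1).filter
    (fun j => PySem.Int.powMod j ((PySem.Int.floordiv (p - 1) 2).toNat) p == 1)) (fun x => x) false

-- gen_gap_seqs: recursive generator, DFS over QR, yield when the sum closes mod p
def pvGenA (QR : List Int) (p : Int) : Nat → Int → List Int → List (List Int)
  | 0, s, seq => if PySem.Int.mod s p == 0 then [seq] else []
  | n + 1, s, seq => QR.flatMap fun g => pvGenA QR p n (s + g) (seq ++ [g])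

def count_kcycles_by_gap_structure (p : Int) (k : Int) : List (List Int × Int) :=
  let QR := pvQR p
  let d : PySem.Dict (List Int) Int :=
    (pvGenA QR p k.toNat 0 []).foldl (fun d seq =>
      let chords : PySem.Set Int := seq.foldl (fun s g => PySem.Set.add s (min g (p - g))) PySem.Set.empty
      let cl := PySem.List.sorted chords (fun x => x) false
      (PySem.List.pyRange 0 cl.length 1).foldl (fun d i =>
        (PySem.List.pyRange (i + 1) cl.length 1).foldl (fun d j =>
          d.modify [PySem.List.pyGetD cl i 0, PySem.List.pyGetD cl j 0] 0 (· + p)) d) d)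
      PySem.Dict.empty
  (d.keys.foldl (fun d key => d.modify key 0 (fun v => PySem.Int.floordiv v k)) d).items

-- ===== PORT B =====
-- itertools.product(QR, repeat=n) in lex order, built by extending prefixes on the right
def pvProdB (QR : List Int) : Nat → List (List Int)
  | 0 => [[]]
  | n + 1 => (pvProdB QR n).flatMap fun u => QR.map fun g => u ++ [g]

def count_kcycles_by_gap_structure_alt (p : Int) (k : Int) : List (List Int × Int) :=
  let QR := pvQR p
  if k ≤ 0 ∨ QR = [] then [] else
  let qrset : PySem.Set Int := PySem.Set.ofList QR
  let copart : PySem.Dict (List Int) Int :=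
    (pvProdB QR (k - 1).toNat).foldl (fun d u =>
      let last := PySem.Int.mod (-(u.sum)) p
      if qrset.contains last then
        let cycle := u ++ [last]
        let cl := PySem.List.sorted (PySem.Set.ofList (cycle.map (fun g => min g (p - g)))) (fun x => x) false
        (PySem.List.combinations cl 2).foldl (fun d pr => d.insert pr (d.getD pr 0 + p)) d
      else d)
      PySem.Dict.empty
  copart.items.map fun it => (it.1, PySem.Int.floordiv it.2 k)

-- ===== PRECONDITION & SPEC =====
-- Pre_ excludes exactly the inputs where A raises: p=0,k=0 (ZeroDivisionError in 0 % p)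
-- and k<0 with p≥2 (unbounded recursion, RecursionError).
def Pre_count_kcycles_by_gap_structure (p : Int) (k : Int) : Prop :=
  (0 ≤ k ∨ p ≤ 1) ∧ ¬(p = 0 ∧ k = 0)
instance (p : Int) (k : Int) : Decidable (Pre_count_kcycles_by_gap_structure p k) := by
  unfold Pre_count_kcycles_by_gap_structure; infer_instance
def pvWitness_count_kcycles_by_gap_structure : Int × Int := (7, 4)

def Spec_count_kcycles_by_gap_structure (p : Int) (k : Int) (out : List (List Int × Int)) : Prop :=
  out = count_kcycles_by_gap_structure_alt p k
instance (p : Int) (k : Int) (out : List (List Int × Int)) : Decidable (Spec_count_kcycles_by_gap_structure p k out) := by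
  unfold Spec_count_kcycles_by_gap_structure; infer_instance

-- ===== CLAIM (what is proved, stated in full; the proofs are below) =====
def Claim_equal_count_kcycles_by_gap_structure : Prop := ∀ (p : Int) (k : Int), Dom_count_kcycles_by_gap_structure p k → Pre_count_kcycles_by_gap_structure p k → Spec_count_kcycles_by_gap_structure p k (count_kcycles_by_gap_structure p k)


-- ===== LEMMAS AND PROOFS =====

-- cons-built lexicographic tuples over QR (proof-only normal form shared by both ports)
def pvTup (QR : List Int) : Nat → List (List Int)
  | 0 => [[]]
  | n + 1 => QR.flatMap fun g => (pvTup QR n).map (g :: ·)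

-- the sorted chord list of a gap sequence, and the per-sequence dict update, in B's form
def pvCl (p : Int) (seq : List Int) : List Int :=
  PySem.List.sorted (PySem.Set.ofList (seq.map (fun g => min g (p - g)))) (fun x => x) false

def pvStep (p : Int) (d : PySem.Dict (List Int) Int) (seq : List Int) : PySem.Dict (List Int) Int :=
  (PySem.List.combinations (pvCl p seq) 2).foldl (fun d pr => d.insert pr (d.getD pr 0 + p)) d

-- common normal form of the co-participation dict built by both ports (k ≥ 1 case)
def pvDictOf (p : Int) (QR : List Int) (n : Nat) : PySem.Dict (List Int) Int :=
  (pvTup QR n).foldl (fun d u =>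
    if PySem.Int.mod (-(u.sum)) p ∈ QR then pvStep p d (u ++ [PySem.Int.mod (-(u.sum)) p]) else d)
    PySem.Dict.empty

lemma pvQR_mem {p g : Int} (h : g ∈ pvQR p) : 1 ≤ g ∧ g < p := by
  unfold pvQR at h
  rw [(PySem.List.sorted_perm _ _ _).mem_iff] at h
  have := List.mem_filter.mp h
  exact (PySem.List.mem_pyRange_one).mp this.1

lemma pvQR_nodup (p : Int) : (pvQR p).Nodup := by
  unfold pvQR
  exact (PySem.List.sorted_perm _ _ _).nodup_iff.mpr ((PySem.List.nodup_pyRange_one 1 p).filter _)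

lemma pvQR_two_le {p : Int} (h : pvQR p ≠ []) : 2 ≤ p := by
  rcases List.exists_mem_of_ne_nil _ h with ⟨g, hg⟩
  have := pvQR_mem hg
  omega

lemma pvGenA_eq (QR : List Int) (p : Int) :
    ∀ (n : Nat) (s : Int) (seq : List Int), pvGenA QR p n s seq =
      (pvTup QR n).filterMap (fun t => if PySem.Int.mod (s + t.sum) p == 0 then some (seq ++ t) else none) := by
  intro n
  induction n with
  | zero =>
    intro s seq
    show _ = List.filterMap _ [[]]
    by_cases h : PySem.Int.mod s p = 0 <;> simp [pvGenA, h]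
  | succ n ih =>
    intro s seq
    simp only [pvGenA, pvTup, List.filterMap_flatMap, List.filterMap_map]
    refine List.flatMap_congr ?_
    intro g hg
    rw [ih (s + g) (seq ++ [g])]
    refine List.filterMap_congr ?_
    intro t ht
    simp [Function.comp, add_assoc]

lemma pvTup_succ (QR : List Int) :
    ∀ n, pvTup QR (n + 1) = (pvTup QR n).flatMap (fun u => QR.map (fun g => u ++ [g])) := by
  intro n
  induction n with
  | zero =>
    show QR.flatMap (fun g => [[g]]) = [[]].flatMap _
    simp only [List.flatMap_cons, List.flatMap_nil, List.append_nil, List.nil_append]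
    induction QR with
    | nil => rfl
    | cons a t iht => simpa using iht
  | succ n ih =>
    conv_lhs => rw [show pvTup QR (n+1+1) = QR.flatMap (fun g => (pvTup QR (n+1)).map (g :: ·)) from rfl]
    conv_lhs => simp only [ih]
    conv_rhs => rw [show pvTup QR (n+1) = QR.flatMap (fun g => (pvTup QR n).map (g :: ·)) from rfl]
    simp only [List.map_flatMap, List.flatMap_assoc, List.flatMap_map, List.map_map]
    refine List.flatMap_congr ?_
    intro g _
    refine List.flatMap_congr ?_
    intro u _
    simp

lemma pvProdB_eq_tup (QR : List Int) : ∀ n, pvProdB QR n = pvTup QR n := by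
  intro n
  induction n with
  | zero => rfl
  | succ n ih => rw [pvProdB, ih, ← pvTup_succ]

-- at most one closing gap: for 1 ≤ g < p, (s+g) % p == 0 iff g is exactly (-s) % p
lemma pvClose_iff {p s g : Int} (hp : 2 ≤ p) (h1 : 1 ≤ g) (h2 : g < p) :
    (PySem.Int.mod (s + g) p == 0) = (g == PySem.Int.mod (-s) p) := by
  rw [PySem.Int.mod_eq_emod_of_pos (by omega), PySem.Int.mod_eq_emod_of_pos (by omega)]
  rw [Bool.eq_iff_iff]
  simp only [beq_iff_eq]
  constructor
  · intro h
    have hd : p ∣ -s - g := by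
      have h' := Int.dvd_of_emod_eq_zero h
      have e : -s - g = -(s + g) := by ring
      rw [e]
      exact dvd_neg.mpr h'
    have hmeq : (-s) % p = g % p :=
      Int.emod_eq_emod_iff_emod_sub_eq_zero.mpr (Int.emod_eq_zero_of_dvd hd)
    rw [hmeq, Int.emod_eq_of_lt (by omega) h2]
  · intro h
    subst h
    have e : (s + (-s) % p) % p = (s + (-s)) % p := by
      conv_rhs => rw [Int.add_emod]
      rw [Int.add_emod, Int.emod_emod_of_dvd _ (dvd_refl p)]
    simp [e]

lemma pvFilterMap_single {QR : List Int} (hnd : QR.Nodup) (c : Int) (F : Int → List Int) :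
    QR.filterMap (fun g => if g = c then some (F g) else none)
      = if c ∈ QR then [F c] else [] := by
  induction QR with
  | nil => simp
  | cons a t ih =>
    rw [List.nodup_cons] at hnd
    obtain ⟨ha, ht⟩ := hnd
    by_cases hac : a = c
    · subst hac
      have hnil : t.filterMap (fun g => if g = a then some (F g) else none) = [] :=
        List.filterMap_eq_nil_iff.mpr (fun g hg => by
          simp [show g ≠ a from fun e => ha (e ▸ hg)])
      simp [hnil]
    · have hih := ih ht
      simp only [List.filterMap_cons, hac, if_false, List.mem_cons]
      rw [hih]
      by_cases hc : c ∈ t <;> simp [hc, Ne.symm hac]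

lemma pvMap_range_getD {β : Type} : ∀ (cs : List Int) (f : Int → β),
    (List.range cs.length).map (fun t => f (cs.getD t 0)) = cs.map f := by
  intro cs
  induction cs with
  | nil => simp
  | cons c cs ih =>
    intro f
    rw [show (c::cs).length = cs.length + 1 from rfl, List.range_succ_eq_map]
    simp only [List.map_cons, List.map_map, List.getD_cons_zero]
    rw [show ((fun t => f ((c::cs).getD t 0)) ∘ Nat.succ) = (fun t => f (cs.getD t 0)) from rfl]
    rw [ih f]

lemma pvAux_pairs : ∀ (cl : List Int),
    (List.range cl.length).flatMap (fun k => (List.range (cl.length - k - 1)).map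
      (fun t => ([cl.getD k 0, cl.getD (k+1+t) 0] : List Int)))
      = PySem.List.combinations cl 2 := by
  intro cl
  induction cl with
  | nil => simp [PySem.List.combinations_nil_succ]
  | cons c cs ih =>
    rw [show (c::cs).length = cs.length + 1 from rfl, List.range_succ_eq_map]
    simp only [List.flatMap_cons, List.flatMap_map]
    have h1 : (List.range (cs.length + 1 - 0 - 1)).map
        (fun t => ([(c::cs).getD 0 0, (c::cs).getD (0+1+t) 0] : List Int))
        = cs.map (fun x => [c, x]) := by
      rw [show cs.length + 1 - 0 - 1 = cs.length from rfl]
      rw [← pvMap_range_getD cs (fun x => [c, x])]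
      refine List.map_congr_left ?_
      intro t ht
      rw [List.getD_cons_zero, show 0+1+t = t+1 by omega, List.getD_cons_succ]
    have h2 : (List.range cs.length).flatMap
        (fun a => (List.range (cs.length + 1 - a.succ - 1)).map
          (fun t => ([(c::cs).getD a.succ 0, (c::cs).getD (a.succ+1+t) 0] : List Int)))
        = PySem.List.combinations cs 2 := by
      rw [← ih]
      refine List.flatMap_congr ?_
      intro k hk
      simp only [Nat.succ_eq_add_one]
      rw [show cs.length + 1 - (k+1) - 1 = cs.length - k - 1 by omega]
      refine List.map_congr_left ?_
      intro t ht
      rw [List.getD_cons_succ, show k+1+1+t = (k+1+t)+1 by omega, List.getD_cons_succ]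
    rw [h1, h2]
    rw [PySem.List.combinations_cons_succ, PySem.List.combinations_one, List.map_map]
    rfl

-- the nested index loops of A walk exactly itertools.combinations(cl, 2)
lemma pvPairlist_eq : ∀ (cl : List Int),
    (PySem.List.pyRange 0 cl.length 1).flatMap (fun i =>
      (PySem.List.pyRange (i + 1) cl.length 1).map (fun j =>
        ([PySem.List.pyGetD cl i 0, PySem.List.pyGetD cl j 0] : List Int)))
      = PySem.List.combinations cl 2 := by
  intro cl
  rw [← pvAux_pairs cl]
  rw [PySem.List.pyRange_one 0 (cl.length : Int)]
  rw [List.flatMap_map]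
  refine List.flatMap_congr ?_
  intro k hk
  rw [List.mem_range] at hk
  rw [PySem.List.pyRange_one (0 + (k:Int) + 1) (cl.length : Int), List.map_map]
  rw [show ((cl.length : Int) - (0 + (k:Int) + 1)).toNat = cl.length - k - 1 by omega]
  refine List.map_congr_left ?_
  intro t ht
  rw [List.mem_range] at ht
  simp only [Function.comp]
  have e1 : (0 + (k:Int)) = ((k : Nat) : Int) := by omega
  have e2 : ((k:Int) + 1 + (t:Int)) = (((k+1+t : Nat)) : Int) := by push_cast; omega
  rw [e1, e2, PySem.List.pyGetD_natCast, PySem.List.pyGetD_natCast]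

-- A's per-sequence body equals pvStep (chord set, sorted list, pair loop, dict update)
lemma pvStepA_eq (p : Int) (d : PySem.Dict (List Int) Int) (seq : List Int) :
    (PySem.List.pyRange 0 (PySem.List.sorted (seq.foldl (fun s g => PySem.Set.add s (min g (p - g))) PySem.Set.empty) (fun x => x) false).length 1).foldl (fun d i =>
      (PySem.List.pyRange (i + 1) (PySem.List.sorted (seq.foldl (fun s g => PySem.Set.add s (min g (p - g))) PySem.Set.empty) (fun x => x) false).length 1).foldl (fun d j =>
        d.modify [PySem.List.pyGetD (PySem.List.sorted (seq.foldl (fun s g => PySem.Set.add s (min g (p - g))) PySem.Set.empty) (fun x => x) false) i 0,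
                  PySem.List.pyGetD (PySem.List.sorted (seq.foldl (fun s g => PySem.Set.add s (min g (p - g))) PySem.Set.empty) (fun x => x) false) j 0] 0 (· + p)) d) d
    = pvStep p d seq := by
  have hch : seq.foldl (fun s g => PySem.Set.add s (min g (p - g))) PySem.Set.empty
      = PySem.Set.ofList (seq.map (fun g => min g (p - g))) := by
    rw [PySem.Set.ofList_eq_foldl, List.foldl_map]
    rfl
  rw [hch]
  show _ = (PySem.List.combinations (pvCl p seq) 2).foldl (fun d pr => d.insert pr (d.getD pr 0 + p)) d
  rw [← pvPairlist_eq (pvCl p seq), List.foldl_flatMap]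
  simp only [List.foldl_map]
  rfl

-- keys stay unique through the whole build
lemma pvDictOf_keys_nodup (p : Int) (QR : List Int) (n : Nat) : (pvDictOf p QR n).keys.Nodup := by
  unfold pvDictOf
  have : ∀ (L : List (List Int)) (d : PySem.Dict (List Int) Int), d.keys.Nodup →
      (L.foldl (fun d u =>
        if PySem.Int.mod (-(u.sum)) p ∈ QR then pvStep p d (u ++ [PySem.Int.mod (-(u.sum)) p]) else d) d).keys.Nodup := by
    intro L
    induction L with
    | nil => intro d hd; simpa using hd
    | cons u L ih =>
      intro d hd
      rw [List.foldl_cons]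
      refine ih _ ?_
      by_cases hc : PySem.Int.mod (-(u.sum)) p ∈ QR
      · simp only [hc, if_true]
        exact PySem.Dict.nodup_keys_foldl_insert _ (fun d x => d.getD x 0 + p) d hd
      · simpa [hc] using hd
  exact this _ _ (by simp)

-- in-place `for key in d: d[key] //= k` = map over items (keys unique, all present)
lemma pvFoldl_modify_items (f : Int → Int) :
    ∀ (L : List (List Int)) (d : PySem.Dict (List Int) Int), L.Nodup → d.keys.Nodup →
      (∀ x ∈ L, d.contains x = true) →
      (L.foldl (fun d key => d.modify key 0 f) d).items
        = d.items.map (fun pr => if pr.1 ∈ L then (pr.1, f pr.2) else pr) := by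
  intro L
  induction L with
  | nil => intro d _ _ _; simp
  | cons x L ih =>
    intro d hLnd hdnd hcont
    rw [List.nodup_cons] at hLnd
    obtain ⟨hxL, hLnd⟩ := hLnd
    have hcx : d.contains x = true := hcont x (by simp)
    have hmod : (d.modify x 0 f).items
        = d.items.map (fun pr => if pr.1 == x then (x, f (d.getD x 0)) else pr) := by
      show (d.insert x (f (d.getD x 0))).items = _
      exact PySem.Dict.items_insert_of_contains d _ hcx
    have hkeys : (d.modify x 0 f).keys = d.keys := by
      rw [PySem.Dict.keys_modify, PySem.Dict.keys_insert_of_contains d _ hcx]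
    have hnd' : (d.modify x 0 f).keys.Nodup := by rw [hkeys]; exact hdnd
    have hcont' : ∀ y ∈ L, (d.modify x 0 f).contains y = true := by
      intro y hy
      rw [PySem.Dict.contains_modify]
      simp [hcont y (by simp [hy])]
    rw [List.foldl_cons, ih _ hLnd hnd' hcont', hmod, List.map_map]
    refine List.map_congr_left ?_
    rintro ⟨a, b⟩ hab
    simp only [Function.comp]
    by_cases hax : a = x
    · subst hax
      have hb : d.getD a 0 = b := PySem.Dict.getD_of_mem_items d hab hdnd 0
      simp [hb, hxL]
    · simp only [show (a == x) = false by simpa using hax]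
      by_cases haL : a ∈ L <;> simp [haL, hax]

-- the final //= k pass over any dict with unique keys is a map over its items
lemma pvFinal_eq (k : Int) (d : PySem.Dict (List Int) Int) (hnd : d.keys.Nodup) :
    (d.keys.foldl (fun d key => d.modify key 0 (fun v => PySem.Int.floordiv v k)) d).items
      = d.items.map (fun it => (it.1, PySem.Int.floordiv it.2 k)) := by
  rw [pvFoldl_modify_items _ d.keys d hnd hnd
      (fun x hx => (PySem.Dict.contains_iff_mem_keys d x).mpr hx)]
  refine List.map_congr_left ?_
  rintro ⟨a, b⟩ hab
  simp [PySem.Dict.mem_keys_of_mem_items d hab]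

-- degenerate cases: both ports return []
lemma pvA_empty (p k : Int)
    (h : pvGenA (pvQR p) p k.toNat 0 [] = [] ∨ pvGenA (pvQR p) p k.toNat 0 [] = [[]]) :
    count_kcycles_by_gap_structure p k = [] := by
  unfold count_kcycles_by_gap_structure
  rcases h with h | h <;> simp only [h] <;> rfl

lemma pvB_empty (p k : Int) (h : k ≤ 0 ∨ pvQR p = []) :
    count_kcycles_by_gap_structure_alt p k = [] := by
  simp only [count_kcycles_by_gap_structure_alt]
  rw [if_pos h]

-- A's sequence list, closed form (k ≥ 1): each prefix extended by its unique closing gap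
lemma pvV_eq (p : Int) (hp : 2 ≤ p) (n : Nat) :
    pvGenA (pvQR p) p (n + 1) 0 [] = (pvTup (pvQR p) n).flatMap (fun u =>
      if PySem.Int.mod (-(u.sum)) p ∈ pvQR p then [u ++ [PySem.Int.mod (-(u.sum)) p]] else []) := by
  rw [pvGenA_eq, pvTup_succ, List.filterMap_flatMap]
  refine List.flatMap_congr ?_
  intro u hu
  rw [List.filterMap_map]
  have hcong : ∀ g ∈ pvQR p,
      ((fun t => if PySem.Int.mod (0 + t.sum) p == 0 then some (([] : List Int) ++ t) else none) ∘
        (fun g => u ++ [g])) g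
      = (fun g => if g = PySem.Int.mod (-(u.sum)) p then some (u ++ [g]) else none) g := by
    intro g hg
    obtain ⟨hg1, hg2⟩ := pvQR_mem hg
    simp only [Function.comp_apply, List.nil_append, zero_add, List.sum_append, List.sum_cons,
      List.sum_nil, add_zero]
    rw [pvClose_iff hp hg1 hg2]
    by_cases h : g = PySem.Int.mod (-(u.sum)) p <;> simp [h]
  rw [List.filterMap_congr hcong, pvFilterMap_single (pvQR_nodup p)]

lemma pvA_main (p k : Int) (hk : 1 ≤ k) (hQR : pvQR p ≠ []) :
    count_kcycles_by_gap_structure p k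
      = (pvDictOf p (pvQR p) (k - 1).toNat).items.map (fun it => (it.1, PySem.Int.floordiv it.2 k)) := by
  have hp := pvQR_two_le hQR
  have hkt : k.toNat = (k - 1).toNat + 1 := by omega
  simp only [count_kcycles_by_gap_structure, pvStepA_eq]
  rw [hkt, pvV_eq p hp, List.foldl_flatMap]
  have hpoint : ∀ (d : PySem.Dict (List Int) Int) (u : List Int), u ∈ pvTup (pvQR p) (k - 1).toNat →
      List.foldl (fun d seq => pvStep p d seq) d
        (if PySem.Int.mod (-(u.sum)) p ∈ pvQR p then [u ++ [PySem.Int.mod (-(u.sum)) p]] else [])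
      = (if PySem.Int.mod (-(u.sum)) p ∈ pvQR p then pvStep p d (u ++ [PySem.Int.mod (-(u.sum)) p]) else d) := by
    intro d u _
    split <;> simp
  have hD : List.foldl (fun acc x => List.foldl (fun d seq => pvStep p d seq) acc
      (if PySem.Int.mod (-x.sum) p ∈ pvQR p then [x ++ [PySem.Int.mod (-x.sum) p]] else []))
      PySem.Dict.empty (pvTup (pvQR p) (k - 1).toNat) = pvDictOf p (pvQR p) (k - 1).toNat := by
    unfold pvDictOf
    exact PySem.List.foldl_congr_mem _ _ _ _ hpoint
  rw [hD, pvFinal_eq k _ (pvDictOf_keys_nodup p (pvQR p) (k - 1).toNat)]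

lemma pvB_main (p k : Int) (hk : 1 ≤ k) (hQR : pvQR p ≠ []) :
    count_kcycles_by_gap_structure_alt p k
      = (pvDictOf p (pvQR p) (k - 1).toNat).items.map (fun it => (it.1, PySem.Int.floordiv it.2 k)) := by
  simp only [count_kcycles_by_gap_structure_alt]
  have hcond : ¬(k ≤ 0 ∨ pvQR p = []) := by
    rintro (h | h)
    · omega
    · exact hQR h
  rw [if_neg hcond]
  congr 1
  rw [pvProdB_eq_tup]
  unfold pvDictOf
  refine congrArg PySem.Dict.items (PySem.List.foldl_congr_mem _ _ _ _ ?_)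
  intro d u hu
  have hc : (PySem.Set.contains (PySem.Set.ofList (pvQR p)) (PySem.Int.mod (-(u.sum)) p) = true)
      ↔ (PySem.Int.mod (-(u.sum)) p ∈ pvQR p) := by
    show (List.contains _ _ = true) ↔ _
    rw [List.contains_iff_mem, PySem.Set.mem_ofList]
  by_cases h : PySem.Int.mod (-(u.sum)) p ∈ pvQR p
  · rw [if_pos (hc.mpr h), if_pos h]
    rfl
  · rw [if_neg (fun hh => h (hc.mp hh)), if_neg h]

-- ===== VERDICT (by name: the statement is the Claim_ definition above) =====
theorem count_kcycles_by_gap_structure_spec : Claim_equal_count_kcycles_by_gap_structure := by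
  intro p k _ hpre
  unfold Spec_count_kcycles_by_gap_structure
  obtain ⟨h1, h2⟩ := hpre
  by_cases hQR : pvQR p = []
  · rw [pvB_empty p k (Or.inr hQR)]
    apply pvA_empty
    rcases hn : k.toNat with _ | n
    · unfold pvGenA
      split
      · right; rfl
      · left; rfl
    · left
      rw [pvGenA, hQR]
      rfl
  · have hp := pvQR_two_le hQR
    by_cases hk : k ≤ 0
    · have hk0 : k = 0 := by omega
      rw [pvB_empty p k (Or.inl hk)]
      apply pvA_empty
      right
      rw [show k.toNat = 0 by omega]
      show pvGenA (pvQR p) p 0 0 [] = [[]]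
      rw [pvGenA]
      rw [if_pos]
      rw [PySem.Int.mod_eq_emod_of_pos (by omega)]
      simp
    · have hk1 : 1 ≤ k := by omega
      rw [pvA_main p k hk1 hQR, pvB_main p k hk1 hQR]
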